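-- pv_equiv track=rewrite | github.com/jjasonn0717/TemporalBART | denoising_event_lm/predictors/event_lm/test_demo_event_lm_orderextra.py | get_all_candidate_chains
-- ===== SOURCE A (Python) =====
-- def get_all_candidate_chains(input_events, unseen_event):
--     """
--     input_events (assume in temporal order): [varg_dict]
--     unseen_events: varg_dict
--     """
--     candidates = []
--     for insert_pos in range(len(input_events)+1):
--         prefix_events = input_events[:insert_pos]
--         suffix_events = input_events[insert_pos:]
--         rotate_events = suffix_events + prefix_events + [unseen_event]
--         assert len(rotate_events) == len(input_events) + 1
--         candidates.append((rotate_events, insert_pos))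
--     assert len(candidates) == len(input_events) + 1
--     return candidates
-- ===== SOURCE B (Python) =====
-- def get_all_candidate_chains(input_events, unseen_event):
--     """Recursive stepwise rotation: keep a current rotation, rotate it left by one
--     element per step; never slices the original input by position."""
--     def go(cur, i):
--         entry = (cur + [unseen_event], i)
--         if i == len(input_events):
--             return [entry]
--         return [entry] + go(cur[1:] + [cur[0]], i + 1)
--     return go(list(input_events), 0)
-- ===== Notes on version B (the rewrite author's own statement) =====
-- stated objective: alternative
-- what changed: Replaces A's loop that re-slices prefix/suffix from the input at every position by a recursion that carries the current rotation and rotates it left one element per step, consing the result list.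
import Mathlib
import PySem

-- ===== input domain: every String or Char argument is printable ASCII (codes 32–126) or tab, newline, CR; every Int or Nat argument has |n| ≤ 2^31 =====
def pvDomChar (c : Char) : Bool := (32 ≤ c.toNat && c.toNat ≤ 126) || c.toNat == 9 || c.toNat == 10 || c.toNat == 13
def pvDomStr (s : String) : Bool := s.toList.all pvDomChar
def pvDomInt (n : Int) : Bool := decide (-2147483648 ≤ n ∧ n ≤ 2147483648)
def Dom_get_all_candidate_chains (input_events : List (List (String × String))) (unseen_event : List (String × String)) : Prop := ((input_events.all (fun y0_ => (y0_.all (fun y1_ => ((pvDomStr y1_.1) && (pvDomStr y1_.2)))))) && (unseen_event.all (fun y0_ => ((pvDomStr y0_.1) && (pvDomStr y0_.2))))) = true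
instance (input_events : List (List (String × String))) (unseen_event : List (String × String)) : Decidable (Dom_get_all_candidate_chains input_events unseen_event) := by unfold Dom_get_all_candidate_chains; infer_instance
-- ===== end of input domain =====

-- B replaces A's per-position prefix/suffix re-slicing by a recursion that carries the
-- current rotation and rotates it left one step at a time; same return value.

-- ===== PORT A =====
def get_all_candidate_chains (input_events : List (List (String × String))) (unseen_event : List (String × String)) : List ((List (List (String × String))) × Int) :=
  (PySem.List.pyRange 0 ((input_events.length : Int) + 1) 1).foldl
    (fun candidates insert_pos =>
      let prefix_events := PySem.List.slice input_events none (some insert_pos)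
      let suffix_events := PySem.List.slice input_events (some insert_pos) none
      let rotate_events := suffix_events ++ prefix_events ++ [unseen_event]
      candidates ++ [(rotate_events, insert_pos)])
    []

-- ===== PORT B =====
-- go(cur, i) of Source B; the countdown fuel k is len(input_events) - i, so 'k = 0' is
-- exactly Python's 'i == len(input_events)'.  'cur[1:] + [cur[0]]' is ported as
-- 'cur.drop 1 ++ cur.take 1': exact whenever cur is nonempty, which holds on every
-- recursive call (cur always has length len(input_events) ≥ k+1 ≥ 1 there).
def pvRotGo (unseen_event : List (String × String)) : Nat → List (List (String × String)) → Int → List ((List (List (String × String))) × Int)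
  | 0, cur, i => [(cur ++ [unseen_event], i)]
  | k+1, cur, i => (cur ++ [unseen_event], i) :: pvRotGo unseen_event k (cur.drop 1 ++ cur.take 1) (i + 1)

def get_all_candidate_chains_alt (input_events : List (List (String × String))) (unseen_event : List (String × String)) : List ((List (List (String × String))) × Int) :=
  pvRotGo unseen_event input_events.length input_events 0

-- ===== PRECONDITION & SPEC =====
def Spec_get_all_candidate_chains (input_events : List (List (String × String))) (unseen_event : List (String × String)) (out : List ((List (List (String × String))) × Int)) : Prop := out = get_all_candidate_chains_alt input_events unseen_event
instance (input_events : List (List (String × String))) (unseen_event : List (String × String)) (out : List ((List (List (String × String))) × Int)) : Decidable (Spec_get_all_candidate_chains input_events unseen_event out) := by unfold Spec_get_all_candidate_chains; infer_instance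

-- ===== CLAIM (what is proved, stated in full; the proofs are below) =====
def Claim_equal_get_all_candidate_chains : Prop := ∀ (input_events : List (List (String × String))) (unseen_event : List (String × String)), Dom_get_all_candidate_chains input_events unseen_event → Spec_get_all_candidate_chains input_events unseen_event (get_all_candidate_chains input_events unseen_event)

-- ===== LEMMAS AND PROOFS =====

-- left-rotation by one
def pvRot1 {α : Type} (l : List α) : List α := l.drop 1 ++ l.take 1

-- append-accumulate fold is a map
theorem foldl_append_singleton {α β : Type} (f : α → β) (l : List α) (acc : List β) :
    l.foldl (fun c x => c ++ [f x]) acc = acc ++ l.map f := by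
  induction l generalizing acc with
  | nil => simp
  | cons a t ih => simp [List.foldl, ih]

theorem rot1_drop_take {α : Type} (l : List α) (j : Nat) (hj : j < l.length) :
    pvRot1 (l.drop j ++ l.take j) = l.drop (j+1) ++ l.take (j+1) := by
  have hdt : l.drop j = l[j] :: l.drop (j+1) := by
    rw [List.drop_eq_getElem_cons hj]
  unfold pvRot1
  conv_rhs => rw [List.take_add_one, List.getElem?_eq_getElem hj]
  rw [hdt]
  simp only [List.cons_append, List.drop_succ_cons, List.drop_zero, List.take_succ_cons,
    List.take_zero, Option.toList_some, List.append_assoc]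

theorem rotN_drop_take {α : Type} (l : List α) (j : Nat) (hj : j ≤ l.length) :
    pvRot1^[j] l = l.drop j ++ l.take j := by
  induction j with
  | zero => simp
  | succ k ih =>
    rw [Function.iterate_succ_apply', ih (Nat.le_of_succ_le hj),
        rot1_drop_take l k (Nat.lt_of_succ_le hj)]

theorem pvRotGo_eq_map (ue : List (String × String)) (k : Nat) :
    ∀ (cur : List (List (String × String))) (i : Int),
    pvRotGo ue k cur i = (List.range (k+1)).map (fun j => (pvRot1^[j] cur ++ [ue], i + (j : Int))) := by
  induction k with
  | zero => intro cur i; simp [pvRotGo]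
  | succ k ih =>
    intro cur i
    rw [show k+1+1 = (k+1)+1 from rfl, List.range_succ_eq_map]
    simp only [pvRotGo, ih, List.map_cons, List.map_map,
      Function.iterate_zero_apply, Nat.cast_zero, add_zero]
    congr 1
    apply List.map_congr_left
    intro j _
    simp [Function.iterate_succ_apply, pvRot1]
    ring

-- A as a map over List.range
theorem portA_eq_map (ie : List (List (String × String))) (ue : List (String × String)) :
    get_all_candidate_chains ie ue
      = (List.range (ie.length+1)).map (fun j => (ie.drop j ++ ie.take j ++ [ue], (j : Int))) := by
  unfold get_all_candidate_chains
  rw [foldl_append_singleton (fun i => (PySem.List.slice ie (some i) none ++ PySem.List.slice ie none (some i) ++ [ue], i))]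
  rw [PySem.List.pyRange_one]
  simp only [List.nil_append, List.map_map]
  have hlen : (((ie.length : Int) + 1 - 0).toNat) = ie.length + 1 := by omega
  rw [hlen]
  apply List.map_congr_left
  intro j _
  simp [PySem.List.slice_from_natCast, PySem.List.slice_to_natCast]

-- ===== VERDICT (by name: the statement is the Claim_ definition above) =====
theorem get_all_candidate_chains_spec : Claim_equal_get_all_candidate_chains := by
  intro ie ue _
  unfold Spec_get_all_candidate_chains get_all_candidate_chains_alt
  rw [portA_eq_map, pvRotGo_eq_map]
  apply List.map_congr_left
  intro j hj
  rw [List.mem_range] at hj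
  rw [rotN_drop_take ie j (Nat.lt_succ_iff.mp hj)]
  simp
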